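-- pv_equiv track=rewrite | github.com/saartanel/iti0102-2019 | ex07_minesweeper/minesweeper.py | add_mines
-- ===== SOURCE A (Python) =====
-- import copy
--
-- def add_mines(minefield: list, mines: list) -> list:
--     """
--     Add mines to a minefield and return minefield.
--
--     This function cannot modify the original minefield list.
--     Minefield must be length long and width wide. Each non-mine position must contain single dot.
--     If a position is empty ("."), then a small mine is added ("x").
--     If a position contains small mine ("x"), a large mine is added ("X").
--     Mines are in a list.
--     Mine is a list. Each mine has 4 integer parameters in the format [N, S, E, W].
--         - N is the distance between area of mines and top of the minefield.
--         - S ... area of mines and bottom of the minefield.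
--         - E ... area of mines and right of the minefield.
--         - W ... area of mines and left of the minefield.
--     :param minefield: list
--     :param mines: list
--     :return: list
--     """
--     mf2 = copy.deepcopy(minefield)
--     for bombs in mines:
--         for rowi in range(bombs[0], len(mf2) - bombs[1]):
--             for coli in range(bombs[3], len(mf2[rowi]) - bombs[2]):
--                 if mf2[rowi][coli] == "x" or mf2[rowi][coli] == "X":
--                     mf2[rowi][coli] = "X"
--                 else:
--                     mf2[rowi][coli] = "x"
--     return mf2
-- ===== SOURCE B (Python) =====
-- def add_mines(minefield: list, mines: list) -> list:
--     """Count rectangle coverage per cell with a per-row 1D difference array,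
--     then map (original cell, count) to the result in one pass."""
--     length = len(minefield)
--     result = []
--     for r, row in enumerate(minefield):
--         w = len(row)
--         diff = [0] * (w + 1)
--         for m in mines:
--             if m[0] <= r < length - m[1]:
--                 lo = m[3]
--                 hi = w - m[2]
--                 if lo < hi:
--                     diff[lo] += 1
--                     diff[hi] -= 1
--         new_row = []
--         c = 0
--         for i, cell in enumerate(row):
--             c += diff[i]
--             if c == 0:
--                 new_row.append(cell)
--             elif cell == "x" or cell == "X":
--                 new_row.append("X")
--             elif c == 1:
--                 new_row.append("x")
--             else:
--                 new_row.append("X")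
--         result.append(new_row)
--     return result
-- ===== Notes on version B (the rewrite author's own statement) =====
-- stated objective: faster
-- what changed: Instead of stamping every cell of every mine rectangle (repeatedly mutating the grid), B counts rectangle coverage per row with a 1D difference array, prefix-sums it, and maps (original cell, coverage count) to the output character in one pass.
-- outside the precondition, e.g. on add_mines([['.']], [[-1, 0, 0, 0]]): A returns [['X']], B returns [['x']]
import Mathlib
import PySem

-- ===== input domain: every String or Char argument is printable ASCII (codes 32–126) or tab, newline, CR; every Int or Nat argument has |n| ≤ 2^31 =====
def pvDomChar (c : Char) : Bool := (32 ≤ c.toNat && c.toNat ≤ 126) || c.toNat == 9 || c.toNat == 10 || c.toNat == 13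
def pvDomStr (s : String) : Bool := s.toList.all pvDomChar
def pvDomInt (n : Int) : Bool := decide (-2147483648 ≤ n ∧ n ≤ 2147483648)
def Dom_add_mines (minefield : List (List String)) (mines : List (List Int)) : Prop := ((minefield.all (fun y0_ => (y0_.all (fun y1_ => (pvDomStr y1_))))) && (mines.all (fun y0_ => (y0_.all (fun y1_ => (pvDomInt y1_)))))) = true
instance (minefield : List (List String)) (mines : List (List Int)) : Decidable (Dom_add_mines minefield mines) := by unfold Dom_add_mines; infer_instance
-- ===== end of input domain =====

-- B replaces per-rectangle stamping by a per-row 1D difference array of coverage counts,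
-- mapped to characters in one pass (objective: faster).


-- ===== PORT A =====
-- the innermost statement: stamp the single cell mf2[rowi][coli]
def pvInner (rowi : Int) (mf2 : List (List String)) (coli : Int) : List (List String) :=
  let cell := PySem.List.pyGetD (PySem.List.pyGetD mf2 rowi []) coli ""
  if cell = "x" || cell = "X" then
    PySem.List.pySetD mf2 rowi (PySem.List.pySetD (PySem.List.pyGetD mf2 rowi []) coli "X")
  else
    PySem.List.pySetD mf2 rowi (PySem.List.pySetD (PySem.List.pyGetD mf2 rowi []) coli "x")

-- the 'for coli in range(bombs[3], len(mf2[rowi]) - bombs[2])' loop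
def pvRowStep (bombs : List Int) (mf2 : List (List String)) (rowi : Int) : List (List String) :=
  (PySem.List.pyRange (PySem.List.pyGetD bombs 3 0)
      (((PySem.List.pyGetD mf2 rowi []).length : Int) - PySem.List.pyGetD bombs 2 0) 1).foldl
    (pvInner rowi) mf2

-- the 'for rowi in range(bombs[0], len(mf2) - bombs[1])' loop
def pvMineStep (mf2 : List (List String)) (bombs : List Int) : List (List String) :=
  (PySem.List.pyRange (PySem.List.pyGetD bombs 0 0) ((mf2.length : Int) - PySem.List.pyGetD bombs 1 0) 1).foldl
    (pvRowStep bombs) mf2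

def add_mines (minefield : List (List String)) (mines : List (List Int)) : List (List String) :=
  mines.foldl pvMineStep minefield

-- ===== PORT B =====
-- B helpers follow Source B: one difference array per row, then a prefix-sum scan.
def pvOutCell (cell : String) (c : Int) : String :=
  if c = 0 then cell
  else if cell = "x" || cell = "X" then "X"
  else if c = 1 then "x" else "X"

-- 'if m[0] <= r < length - m[1]: ... diff[lo] += 1; diff[hi] -= 1'
def pvDStep (len0 r : Int) (w : Nat) (diff : List Int) (m : List Int) : List Int :=
  if PySem.List.pyGetD m 0 0 ≤ r ∧ r < len0 - PySem.List.pyGetD m 1 0 then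
    if PySem.List.pyGetD m 3 0 < (w : Int) - PySem.List.pyGetD m 2 0 then
      let d1 := PySem.List.pySetD diff (PySem.List.pyGetD m 3 0)
        (PySem.List.pyGetD diff (PySem.List.pyGetD m 3 0) 0 + 1)
      PySem.List.pySetD d1 ((w : Int) - PySem.List.pyGetD m 2 0)
        (PySem.List.pyGetD d1 ((w : Int) - PySem.List.pyGetD m 2 0) 0 - 1)
    else diff
  else diff

def pvDiffRow (len0 r : Int) (w : Nat) (mines : List (List Int)) : List Int :=
  mines.foldl (pvDStep len0 r w) (List.replicate (w + 1) 0)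

-- 'for i, cell in enumerate(row): c += diff[i]; new_row.append(...)'
def pvScanRow : List String → List Int → Int → Nat → List String
  | [], _, _, _ => []
  | cell :: rest, diff, c, i =>
    pvOutCell cell (c + PySem.List.pyGetD diff (i : Int) 0) ::
      pvScanRow rest diff (c + PySem.List.pyGetD diff (i : Int) 0) (i + 1)

def add_mines_alt (minefield : List (List String)) (mines : List (List Int)) : List (List String) :=
  minefield.mapIdx (fun r row =>
    pvScanRow row (pvDiffRow (minefield.length : Int) (r : Int) row.length mines) 0 0)

-- ===== PRECONDITION & SPEC =====
-- Pre_ excludes exactly the troublesome mines among those whose loop ranges actually run: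
-- a mine with fewer than 2 entries (A raises IndexError reading it), a mine with a non-empty row
-- range but fewer than 4 entries or a negative top/bottom distance, and a mine with a negative
-- left/right distance on a row where its column range is non-empty: distances are non-negative by
-- the function's spec, and on negative ones A either raises IndexError or silently wraps around to
-- rows/columns counted from the other edge, an artefact of Python's negative indexing outside the
-- natural domain. Mines whose ranges never run are admitted whatever their entries.
def Pre_add_mines (minefield : List (List String)) (mines : List (List Int)) : Prop :=
  ∀ m ∈ mines, 2 ≤ m.length ∧
    (PySem.List.pyGetD m 0 0 < (minefield.length : Int) - PySem.List.pyGetD m 1 0 →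
      4 ≤ m.length ∧ 0 ≤ PySem.List.pyGetD m 0 0 ∧ 0 ≤ PySem.List.pyGetD m 1 0 ∧
      (∀ r : Nat, r < minefield.length → PySem.List.pyGetD m 0 0 ≤ (r : Int) →
        (r : Int) < (minefield.length : Int) - PySem.List.pyGetD m 1 0 →
        PySem.List.pyGetD m 3 0 < ((minefield.getD r []).length : Int) - PySem.List.pyGetD m 2 0 →
        0 ≤ PySem.List.pyGetD m 3 0 ∧ 0 ≤ PySem.List.pyGetD m 2 0))
instance (minefield : List (List String)) (mines : List (List Int)) : Decidable (Pre_add_mines minefield mines) := by unfold Pre_add_mines; infer_instance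

def pvWitness_add_mines : List (List String) × List (List Int) :=
  ([[".", "x"], ["X", "."]], [[0, 0, 0, 0], [1, 0, 1, 0]])

def Spec_add_mines (minefield : List (List String)) (mines : List (List Int)) (out : List (List String)) : Prop := out = add_mines_alt minefield mines
instance (minefield : List (List String)) (mines : List (List Int)) (out : List (List String)) : Decidable (Spec_add_mines minefield mines out) := by unfold Spec_add_mines; infer_instance

-- ===== CLAIM (what is proved, stated in full; the proofs are below) =====
def Claim_equal_add_mines : Prop := ∀ (minefield : List (List String)) (mines : List (List Int)), Dom_add_mines minefield mines → Pre_add_mines minefield mines → Spec_add_mines minefield mines (add_mines minefield mines)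

-- ===== LEMMAS AND PROOFS =====

-- the common specification: each cell is stamped once per covering mine
def pvStamp (cell : String) : String := if cell = "x" || cell = "X" then "X" else "x"

def pvStampPow : Nat → String → String
  | 0, s => s
  | n + 1, s => pvStamp (pvStampPow n s)

def pvCovers (L : Int) (w : Nat) (r c : Nat) (m : List Int) : Bool :=
  decide (PySem.List.pyGetD m 0 0 ≤ (r : Int) ∧ (r : Int) < L - PySem.List.pyGetD m 1 0
    ∧ PySem.List.pyGetD m 3 0 ≤ (c : Int) ∧ (c : Int) < (w : Int) - PySem.List.pyGetD m 2 0)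

def pvGridOf (mf : List (List String)) (ms : List (List Int)) : List (List String) :=
  mf.mapIdx (fun r row => row.mapIdx (fun c cell =>
    pvStampPow (ms.countP (pvCovers (mf.length : Int) row.length r c)) cell))

-- ---------- prefix sums of a difference array ----------
def pvS (d : List Int) (n : Nat) : Int := ((List.range n).map (fun j => d.getD j 0)).sum

lemma pvS_succ (d : List Int) (n : Nat) : pvS d (n + 1) = pvS d n + d.getD n 0 := by
  simp [pvS, List.range_succ]

lemma pvS_replicate (k n : Nat) : pvS (List.replicate k (0 : Int)) n = 0 := by
  induction n with
  | zero => simp [pvS]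
  | succ n ih =>
    rw [pvS_succ, ih]
    cases h : (List.replicate k (0:Int))[n]? with
    | none => simp [List.getD, h]
    | some v =>
      have := List.getElem?_replicate (a := (0:Int)) (n := k) (i := n)
      rw [h] at this
      simp [List.getD, h]
      split at this <;> simp_all

lemma pvGetD_set (d : List Int) (i n : Nat) (x : Int) (h : i < d.length) :
    (d.set i x).getD n 0 = if i = n then x else d.getD n 0 := by
  by_cases hin : i = n
  · subst hin
    simp [List.getD, List.getElem?_set_self (by simpa using h)]
  · simp [List.getD, List.getElem?_set_ne hin, hin]

lemma pvS_set (d : List Int) (i : Nat) (x : Int) (n : Nat) (h : i < d.length) :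
    pvS (d.set i x) n = pvS d n + (if i < n then x - d.getD i 0 else 0) := by
  induction n with
  | zero => simp [pvS]
  | succ n ih =>
    rw [pvS_succ, pvS_succ, ih, pvGetD_set d i n x h]
    by_cases hin : i = n
    · subst hin
      split_ifs <;> omega
    · rw [if_neg hin]
      split_ifs <;> omega

-- ---------- B side ----------
lemma pvDStep_length (len0 r : Int) (w : Nat) (d m : List Int) :
    (pvDStep len0 r w d m).length = d.length := by
  simp only [pvDStep]
  split_ifs <;> simp [PySem.List.length_pySetD]

lemma pvDStep_sum (len0 : Int) (r w : Nat) (d m : List Int) (c : Nat) (_hc : c < w)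
    (hd : d.length = w + 1)
    (hcond : (PySem.List.pyGetD m 0 0 ≤ (r : Int) ∧ (r : Int) < len0 - PySem.List.pyGetD m 1 0) →
      PySem.List.pyGetD m 3 0 < (w : Int) - PySem.List.pyGetD m 2 0 →
      0 ≤ PySem.List.pyGetD m 3 0 ∧ 0 ≤ PySem.List.pyGetD m 2 0) :
    pvS (pvDStep len0 (r : Int) w d m) (c + 1)
      = pvS d (c + 1) + (if pvCovers len0 w r c m then 1 else 0) := by
  simp only [pvDStep]
  by_cases hrow : PySem.List.pyGetD m 0 0 ≤ (r : Int) ∧ (r : Int) < len0 - PySem.List.pyGetD m 1 0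
  · rw [if_pos hrow]
    by_cases hlh : PySem.List.pyGetD m 3 0 < (w : Int) - PySem.List.pyGetD m 2 0
    · rw [if_pos hlh]
      obtain ⟨h3, h2⟩ := hcond hrow hlh
      have hhi0 : (0 : Int) < (w : Int) - PySem.List.pyGetD m 2 0 := lt_of_le_of_lt h3 hlh
      rw [PySem.List.pySetD_of_nonneg _ _ h3, PySem.List.pyGetD_of_nonneg _ _ h3,
          PySem.List.pySetD_of_nonneg _ _ (le_of_lt hhi0), PySem.List.pyGetD_of_nonneg _ _ (le_of_lt hhi0)]
      rw [pvS_set _ _ _ _ (by rw [List.length_set, hd]; omega),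
          pvS_set _ _ _ _ (by rw [hd]; omega)]
      simp only [pvCovers, hrow.1, hrow.2, true_and, decide_eq_true_eq]
      split_ifs <;> omega
    · rw [if_neg hlh]
      have : pvCovers len0 w r c m = false := by
        simp only [pvCovers, decide_eq_false_iff_not]
        intro h
        omega
      rw [this]
      simp
  · rw [if_neg hrow]
    have : pvCovers len0 w r c m = false := by
      simp only [pvCovers, decide_eq_false_iff_not]
      intro h
      exact hrow ⟨h.1, h.2.1⟩
    rw [this]
    simp

lemma pvDiffRow_count (len0 : Int) (r w c : Nat) (hc : c < w) (ms : List (List Int))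
    (hpre : ∀ m ∈ ms,
      (PySem.List.pyGetD m 0 0 ≤ (r : Int) ∧ (r : Int) < len0 - PySem.List.pyGetD m 1 0) →
      PySem.List.pyGetD m 3 0 < (w : Int) - PySem.List.pyGetD m 2 0 →
      0 ≤ PySem.List.pyGetD m 3 0 ∧ 0 ≤ PySem.List.pyGetD m 2 0) :
    pvS (pvDiffRow len0 (r : Int) w ms) (c + 1) = (ms.countP (pvCovers len0 w r c) : Int) := by
  have aux : ∀ (ms : List (List Int)), (∀ m ∈ ms,
      (PySem.List.pyGetD m 0 0 ≤ (r : Int) ∧ (r : Int) < len0 - PySem.List.pyGetD m 1 0) →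
      PySem.List.pyGetD m 3 0 < (w : Int) - PySem.List.pyGetD m 2 0 →
      0 ≤ PySem.List.pyGetD m 3 0 ∧ 0 ≤ PySem.List.pyGetD m 2 0) →
      ∀ d : List Int, d.length = w + 1 →
      pvS (ms.foldl (pvDStep len0 (r : Int) w) d) (c + 1)
        = pvS d (c + 1) + (ms.countP (pvCovers len0 w r c) : Int) := by
    intro ms
    induction ms with
    | nil => intro _ d _; simp
    | cons m ms ih =>
      intro h d hd
      have hm := h m (List.mem_cons_self)
      rw [List.foldl_cons,
          ih (fun m' hm' => h m' (List.mem_cons_of_mem _ hm')) _ (by rw [pvDStep_length]; exact hd),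
          pvDStep_sum len0 r w d m c hc hd hm,
          List.countP_cons]
      push_cast
      split_ifs <;> ring
  rw [pvDiffRow, aux ms hpre _ (by simp), pvS_replicate]
  ring

lemma pvScanRow_eq (diff : List Int) (row : List String) :
    ∀ (i : Nat) (c : Int), c = pvS diff i →
    pvScanRow row diff c i = row.mapIdx (fun j cell => pvOutCell cell (pvS diff (i + j + 1))) := by
  induction row with
  | nil => intro i c _; simp [pvScanRow]
  | cons cell rest ih =>
    intro i c h
    have hc' : c + PySem.List.pyGetD diff (i : Int) 0 = pvS diff (i + 1) := by
      rw [pvS_succ, h, PySem.List.pyGetD_natCast]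
    rw [pvScanRow, List.mapIdx_cons, hc', ih (i + 1) _ rfl]
    have heq : (fun j cell => pvOutCell cell (pvS diff (i + 1 + j + 1)))
        = (fun j cell => pvOutCell cell (pvS diff (i + (j + 1) + 1))) := by
      funext j x
      congr 2
      omega
    rw [heq]

lemma pvStampPow_big (k : Nat) (cell : String) : pvStampPow (k + 2) cell = "X" := by
  induction k with
  | zero => show pvStamp (pvStamp cell) = "X"; unfold pvStamp; split_ifs <;> simp_all
  | succ k ih => show pvStamp (pvStampPow (k + 2) cell) = "X"; rw [ih]; rfl

lemma pvOutCell_natCast (k : Nat) (cell : String) : pvOutCell cell (k : Int) = pvStampPow k cell := by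
  match k with
  | 0 => rfl
  | 1 => unfold pvOutCell pvStampPow pvStampPow pvStamp; split_ifs <;> simp_all
  | k + 2 =>
    rw [pvStampPow_big]
    unfold pvOutCell
    split_ifs <;> first | rfl | omega

theorem pvB_eq_grid (mf : List (List String)) (ms : List (List Int))
    (hpre : Pre_add_mines mf ms) : add_mines_alt mf ms = pvGridOf mf ms := by
  unfold add_mines_alt pvGridOf
  apply List.ext_getElem (by simp)
  intro r h1 h2
  simp only [List.getElem_mapIdx]
  rw [pvScanRow_eq _ _ 0 0 (by simp [pvS])]
  apply List.ext_getElem (by simp)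
  intro c hc1 hc2
  simp only [List.getElem_mapIdx]
  have hper : ∀ m ∈ ms,
      (PySem.List.pyGetD m 0 0 ≤ (r : Int) ∧ (r : Int) < (mf.length : Int) - PySem.List.pyGetD m 1 0) →
      PySem.List.pyGetD m 3 0 < (((mf[r]'(by simpa using h2)).length : Nat) : Int) - PySem.List.pyGetD m 2 0 →
      0 ≤ PySem.List.pyGetD m 3 0 ∧ 0 ≤ PySem.List.pyGetD m 2 0 := by
    intro m hm hrow hcolne
    refine ((hpre m hm).2 (by omega)).2.2.2 r (by simpa using h2) hrow.1 hrow.2 ?_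
    rw [List.getD_eq_getElem _ _ (by simpa using h2)]
    exact hcolne
  rw [show (0 : Nat) + c + 1 = c + 1 by omega,
      pvDiffRow_count mf.length r _ c (by simpa using hc2) ms hper,
      pvOutCell_natCast]

-- ---------- A side ----------
lemma pvInnerFold (rowi : Int) :
    ∀ (n : Nat) (lo hi : Int) (g : List (List String)) (hr : 0 ≤ rowi)
      (hr2 : rowi < (g.length : Int))
      (_ : lo < hi → 0 ≤ lo ∧ hi ≤ (((g[rowi.toNat]'(by omega)).length : Nat) : Int))
      (_ : n = (hi - lo).toNat),
    (PySem.List.pyRange lo hi 1).foldl (pvInner rowi) g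
      = g.set rowi.toNat ((g[rowi.toNat]'(by omega)).mapIdx
          (fun c cell => if lo ≤ (c : Int) ∧ (c : Int) < hi then pvStamp cell else cell)) := by
  intro n
  induction n with
  | zero =>
    intro lo hi g hr hr2 _hb hn
    rw [PySem.List.pyRange_one_eq_nil (by omega), List.foldl_nil]
    have hthis : (g[rowi.toNat]'(by omega)).mapIdx
        (fun c cell => if lo ≤ (c : Int) ∧ (c : Int) < hi then pvStamp cell else cell)
        = g[rowi.toNat]'(by omega) := by
      apply List.ext_getElem (by simp)
      intro c hc1 hc2
      simp only [List.getElem_mapIdx]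
      rw [if_neg (by omega)]
    rw [hthis, List.set_getElem_self]
  | succ n ih =>
    intro lo hi g hr hr2 hb hn
    have hlt : lo < hi := by omega
    obtain ⟨hlo, hhi⟩ := hb hlt
    have hrt : rowi.toNat < g.length := by omega
    have hclt : lo.toNat < (g[rowi.toNat]'hrt).length := by omega
    rw [PySem.List.pyRange_one_cons hlt, List.foldl_cons]
    have hread : PySem.List.pyGetD g rowi [] = g[rowi.toNat]'hrt :=
      PySem.List.pyGetD_eq_getElem g [] hr hr2
    have hstep : pvInner rowi g lo
        = g.set rowi.toNat ((g[rowi.toNat]'hrt).set lo.toNat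
            (pvStamp ((g[rowi.toNat]'hrt)[lo.toNat]'hclt))) := by
      simp only [pvInner]
      rw [hread, PySem.List.pyGetD_eq_getElem _ _ hlo (by omega)]
      split_ifs with h
      · rw [PySem.List.pySetD_of_nonneg _ _ hlo, PySem.List.pySetD_of_nonneg _ _ hr]
        simp [pvStamp, h]
      · rw [PySem.List.pySetD_of_nonneg _ _ hlo, PySem.List.pySetD_of_nonneg _ _ hr]
        simp only [pvStamp]
        rw [if_neg (by simpa using h)]
    rw [hstep]
    rw [ih (lo + 1) hi _ hr (by simpa using hr2)
        (fun _ => ⟨by omega, by simp only [List.getElem_set_self, List.length_set]; omega⟩) (by omega)]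
    rw [List.set_set]
    simp only [List.getElem_set_self]
    congr 1
    apply List.ext_getElem (by simp)
    intro c hc1 hc2
    rw [List.getElem_mapIdx, List.getElem_mapIdx]
    simp only [List.getElem_set]
    by_cases hcl : lo.toNat = c
    · subst hcl
      rw [if_neg (by omega), if_pos rfl, if_pos (by omega)]
    · rw [if_neg hcl]
      split_ifs <;> first | rfl | omega

lemma pvOuterFold (bombs : List Int) :
    ∀ (n : Nat) (lo hi : Int) (g : List (List String))
      (_ : lo < hi → 0 ≤ lo ∧ hi ≤ (g.length : Int))
      (_ : ∀ r : Nat, r < g.length → lo ≤ (r : Int) → (r : Int) < hi →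
        PySem.List.pyGetD bombs 3 0 < (((g.getD r []).length : Nat) : Int) - PySem.List.pyGetD bombs 2 0 →
        0 ≤ PySem.List.pyGetD bombs 3 0 ∧ 0 ≤ PySem.List.pyGetD bombs 2 0)
      (_ : n = (hi - lo).toNat),
    (PySem.List.pyRange lo hi 1).foldl (pvRowStep bombs) g
      = g.mapIdx (fun r row => if lo ≤ (r : Int) ∧ (r : Int) < hi then
          row.mapIdx (fun c cell =>
            if PySem.List.pyGetD bombs 3 0 ≤ (c : Int)
               ∧ (c : Int) < (row.length : Int) - PySem.List.pyGetD bombs 2 0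
            then pvStamp cell else cell)
          else row) := by
  intro n
  induction n with
  | zero =>
    intro lo hi g _hb _hcol hn
    rw [PySem.List.pyRange_one_eq_nil (by omega), List.foldl_nil]
    apply List.ext_getElem (by simp)
    intro r hr1 hr2
    simp only [List.getElem_mapIdx]
    rw [if_neg (by omega)]
  | succ n ih =>
    intro lo hi g hb hcol hn
    have hlt : lo < hi := by omega
    obtain ⟨hlo, hhi⟩ := hb hlt
    have hrt : lo.toNat < g.length := by omega
    have hgd : g.getD lo.toNat [] = g[lo.toNat]'hrt := List.getD_eq_getElem g [] hrt
    rw [PySem.List.pyRange_one_cons hlt, List.foldl_cons]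
    have hread : PySem.List.pyGetD g lo [] = g[lo.toNat]'hrt :=
      PySem.List.pyGetD_eq_getElem g [] hlo (by omega)
    have hcolme : PySem.List.pyGetD bombs 3 0
          < (((g[lo.toNat]'hrt).length : Nat) : Int) - PySem.List.pyGetD bombs 2 0 →
        0 ≤ PySem.List.pyGetD bombs 3 0 ∧ 0 ≤ PySem.List.pyGetD bombs 2 0 := by
      intro hne
      exact hcol lo.toNat hrt (by omega) (by omega) (by rw [hgd]; exact hne)
    have hstep : pvRowStep bombs g lo
        = g.set lo.toNat ((g[lo.toNat]'hrt).mapIdx (fun c cell =>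
            if PySem.List.pyGetD bombs 3 0 ≤ (c : Int)
               ∧ (c : Int) < ((g[lo.toNat]'hrt).length : Int) - PySem.List.pyGetD bombs 2 0
            then pvStamp cell else cell)) := by
      unfold pvRowStep
      rw [hread]
      exact pvInnerFold lo _ _ _ g hlo (by omega)
        (fun hne => ⟨(hcolme hne).1, by have := (hcolme hne).2; omega⟩) rfl
    rw [hstep]
    have hlen : ∀ r : Nat, r < g.length →
        (((g.set lo.toNat ((g[lo.toNat]'hrt).mapIdx (fun c cell =>
            if PySem.List.pyGetD bombs 3 0 ≤ (c : Int)
               ∧ (c : Int) < ((g[lo.toNat]'hrt).length : Int) - PySem.List.pyGetD bombs 2 0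
            then pvStamp cell else cell))).getD r []).length) = ((g.getD r []).length) := by
      intro r hr
      rw [List.getD_eq_getElem _ _ (by simpa using hr), List.getD_eq_getElem _ _ hr,
          List.getElem_set]
      by_cases hrl : lo.toNat = r
      · subst hrl
        rw [if_pos rfl, List.length_mapIdx]
      · rw [if_neg hrl]
    rw [ih (lo + 1) hi _ (fun _ => ⟨by omega, by simpa using hhi⟩)
        (fun r hr hle hlt' hne => hcol r (by simpa using hr) (by omega) (by omega)
          (by rw [hlen r (by simpa using hr)] at hne; exact hne)) (by omega)]
    apply List.ext_getElem (by simp)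
    intro r hr1 hr2
    simp only [List.getElem_mapIdx, List.getElem_set]
    by_cases hrl : lo.toNat = r
    · subst hrl
      rw [if_neg (by omega), if_pos rfl, if_pos (by omega)]
    · rw [if_neg hrl]
      split_ifs <;> first | rfl | omega

lemma pvMineStep_grid (g : List (List String)) (m : List Int)
    (hrow : PySem.List.pyGetD m 0 0 < (g.length : Int) - PySem.List.pyGetD m 1 0 →
      0 ≤ PySem.List.pyGetD m 0 0 ∧ 0 ≤ PySem.List.pyGetD m 1 0)
    (hcol : ∀ r : Nat, r < g.length → PySem.List.pyGetD m 0 0 ≤ (r : Int) →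
      (r : Int) < (g.length : Int) - PySem.List.pyGetD m 1 0 →
      PySem.List.pyGetD m 3 0 < (((g.getD r []).length : Nat) : Int) - PySem.List.pyGetD m 2 0 →
      0 ≤ PySem.List.pyGetD m 3 0 ∧ 0 ≤ PySem.List.pyGetD m 2 0) :
    pvMineStep g m = g.mapIdx (fun r row => row.mapIdx (fun c cell =>
      if pvCovers (g.length : Int) row.length r c m then pvStamp cell else cell)) := by
  unfold pvMineStep
  rw [pvOuterFold m _ _ _ g
      (fun h => ⟨(hrow h).1, by have := (hrow h).2; omega⟩)
      (fun r hr hle hlt' hne => hcol r hr hle hlt' hne) rfl]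
  apply List.ext_getElem (by simp)
  intro r hr1 hr2
  simp only [List.getElem_mapIdx]
  by_cases hrowc : PySem.List.pyGetD m 0 0 ≤ (r : Int)
      ∧ (r : Int) < (g.length : Int) - PySem.List.pyGetD m 1 0
  · rw [if_pos hrowc]
    apply List.ext_getElem (by simp)
    intro c hc1 hc2
    simp only [List.getElem_mapIdx, pvCovers, decide_eq_true_eq]
    split_ifs <;> first | rfl | omega
  · rw [if_neg hrowc]
    apply List.ext_getElem (by simp)
    intro c hc1 hc2
    rw [List.getElem_mapIdx,
        if_neg (by simp only [pvCovers, decide_eq_true_eq]; intro hcon; exact hrowc ⟨hcon.1, hcon.2.1⟩)]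

theorem pvA_eq_grid (mf : List (List String)) (ms : List (List Int))
    (hpre : Pre_add_mines mf ms) : add_mines mf ms = pvGridOf mf ms := by
  have hgrow : ∀ (ks : List (List Int)) (r : Nat), r < mf.length →
      ((pvGridOf mf ks).getD r []).length = ((mf.getD r []).length) := by
    intro ks r hr
    rw [List.getD_eq_getElem _ _ (by simpa [pvGridOf] using hr), List.getD_eq_getElem _ _ hr]
    simp [pvGridOf]
  have aux : ∀ (ms2 : List (List Int)), (∀ m ∈ ms2, 2 ≤ m.length ∧
      (PySem.List.pyGetD m 0 0 < (mf.length : Int) - PySem.List.pyGetD m 1 0 →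
        4 ≤ m.length ∧ 0 ≤ PySem.List.pyGetD m 0 0 ∧ 0 ≤ PySem.List.pyGetD m 1 0 ∧
        (∀ r : Nat, r < mf.length → PySem.List.pyGetD m 0 0 ≤ (r : Int) →
          (r : Int) < (mf.length : Int) - PySem.List.pyGetD m 1 0 →
          PySem.List.pyGetD m 3 0 < ((mf.getD r []).length : Int) - PySem.List.pyGetD m 2 0 →
          0 ≤ PySem.List.pyGetD m 3 0 ∧ 0 ≤ PySem.List.pyGetD m 2 0))) →
      ∀ ks : List (List Int), ms2.foldl pvMineStep (pvGridOf mf ks) = pvGridOf mf (ks ++ ms2) := by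
    intro ms2
    induction ms2 with
    | nil => intro _ ks; simp
    | cons m rest ih =>
      intro h ks
      have hm := h m List.mem_cons_self
      rw [List.foldl_cons]
      have hglen : (pvGridOf mf ks).length = mf.length := by simp [pvGridOf]
      have hstep : pvMineStep (pvGridOf mf ks) m = pvGridOf mf (ks ++ [m]) := by
        rw [pvMineStep_grid _ m
            (by rw [hglen]; intro hne; exact ⟨(hm.2 hne).2.1, (hm.2 hne).2.2.1⟩)
            (by
              rw [hglen]
              intro r hr hle hlt' hne
              refine (hm.2 (by omega)).2.2.2 r hr hle hlt' ?_
              rw [← hgrow ks r hr]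
              exact hne)]
        apply List.ext_getElem (by simp [pvGridOf])
        intro r hr1 hr2
        simp only [pvGridOf, List.getElem_mapIdx, List.length_mapIdx]
        apply List.ext_getElem (by simp)
        intro c hc1 hc2
        simp only [List.getElem_mapIdx, List.countP_append]
        by_cases hcov : pvCovers (mf.length : Int) ((mf[r]'(by simpa [pvGridOf] using hr2)).length) r c m
        · rw [if_pos hcov]
          simp [hcov, pvStampPow]
        · rw [if_neg hcov]
          simp [hcov]
      rw [hstep, ih (fun m' hm' => h m' (List.mem_cons_of_mem _ hm')) (ks ++ [m])]
      simp
  have h0 : pvGridOf mf [] = mf := by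
    apply List.ext_getElem (by simp [pvGridOf])
    intro r hr1 hr2
    simp only [pvGridOf, List.getElem_mapIdx, List.countP_nil]
    apply List.ext_getElem (by simp)
    intro c hc1 hc2
    simp [List.getElem_mapIdx, pvStampPow]
  show ms.foldl pvMineStep mf = pvGridOf mf ms
  calc ms.foldl pvMineStep mf = ms.foldl pvMineStep (pvGridOf mf []) := by rw [h0]
    _ = pvGridOf mf ([] ++ ms) := aux ms hpre []
    _ = pvGridOf mf ms := by simp

-- ===== VERDICT (by name: the statement is the Claim_ definition above) =====
theorem add_mines_spec : Claim_equal_add_mines := by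
  intro mf ms _ hpre
  unfold Spec_add_mines
  rw [pvA_eq_grid mf ms hpre, pvB_eq_grid mf ms hpre]
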